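-- pv_equiv track=rewrite | github.com/HelloSSIFI/HelloWorld | programmers/Lv2_귤_고르기/s1_lbefull.py | solution
-- ===== SOURCE A (Python) =====
-- def solution(k, tangerine):
--     answer = 0
--     cnt = dict()
--     for i in range(len(tangerine)):                                 # 귤의 크기를 key로 하여 개수를 value에 저장
--         cnt[tangerine[i]] = cnt.get(tangerine[i], 0) + 1
--     cnt = sorted(cnt.values(), reverse=True)                        # 귤의 개수를 내림차순으로 정렬
--     for c in cnt:                                                   # 귤의 개수를 순회
--         k -= c                                                      # 현재 크기의 개수를 추가(k에서 빼줌)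
--         answer += 1                                                 # 크기의 종류가 1 증가
--         if k <= 0:                                                  # k개를 넘어서면 반복 종료
--             break
--     return answer
-- ===== SOURCE B (Python) =====
-- def solution(k, tangerine):
--     cnt = {}
--     for t in tangerine:
--         cnt[t] = cnt.get(t, 0) + 1
--     counts = sorted(cnt.values(), reverse=True)
--     if not counts:
--         return 0
--     prefix = []
--     total = 0
--     for c in counts:
--         total += c
--         prefix.append(total)
--     lo, hi = 0, len(prefix)
--     while lo < hi:
--         mid = (lo + hi) // 2
--         if prefix[mid] < k:
--             lo = mid + 1
--         else:
--             hi = mid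
--     return min(lo, len(prefix) - 1) + 1
-- ===== Notes on version B (the rewrite author's own statement) =====
-- stated objective: alternative
-- what changed: Replaces A's linear greedy subtraction scan over the descending counts by building a prefix-sum table and binary-searching it for the first cumulative count >= k (clamped so k exceeding the total still yields the number of distinct sizes).
import Mathlib
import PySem

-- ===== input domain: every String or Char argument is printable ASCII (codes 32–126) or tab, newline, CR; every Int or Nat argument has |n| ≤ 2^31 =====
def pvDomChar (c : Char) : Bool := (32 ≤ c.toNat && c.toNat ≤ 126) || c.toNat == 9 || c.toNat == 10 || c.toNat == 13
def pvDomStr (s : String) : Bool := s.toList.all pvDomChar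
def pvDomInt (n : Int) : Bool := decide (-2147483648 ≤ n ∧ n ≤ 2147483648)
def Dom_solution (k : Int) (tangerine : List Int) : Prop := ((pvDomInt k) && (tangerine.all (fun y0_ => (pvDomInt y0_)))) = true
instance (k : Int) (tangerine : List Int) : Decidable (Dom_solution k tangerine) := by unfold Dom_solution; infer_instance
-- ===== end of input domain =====

-- B replaces A's linear greedy scan over descending counts by a pfx-sum table plus
-- a hand-written binary search for the first pfx ≥ k (objective: alternative).

-- ===== PORT A =====
-- the greedy loop with break: recursion over the remaining counts with state (k, answer)
def solLoopA (k : Int) (answer : Int) : List Int → Int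
  | [] => answer
  | c :: rest =>
    let k' := k - c
    let answer' := answer + 1
    if k' ≤ 0 then answer' else solLoopA k' answer' rest

def solution (k : Int) (tangerine : List Int) : Int :=
  -- tangerine[i] with i drawn from range(len(tangerine)) is always in range, so pyGetD is exact here
  let cnt := (PySem.List.pyRange 0 (tangerine.length : Int) 1).foldl
    (fun d i => d.insert (PySem.List.pyGetD tangerine i 0) (d.getD (PySem.List.pyGetD tangerine i 0) 0 + 1))
    PySem.Dict.empty
  let cntList := PySem.List.sorted cnt.values (fun x => x) true
  solLoopA k 0 cntList

-- ===== PORT B =====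
-- binary search: first index lo with pfx[lo] ≥ k (pfx[mid] is always in range since mid < hi ≤ len)
def solBSearchGo (pfx : List Int) (k : Int) : Nat → Nat → Nat → Nat
  | 0, lo, _ => lo
  | fuel + 1, lo, hi =>
    if lo < hi then
      if pfx.getD ((lo + hi) / 2) 0 < k then solBSearchGo pfx k fuel ((lo + hi) / 2 + 1) hi
      else solBSearchGo pfx k fuel lo ((lo + hi) / 2)
    else lo

-- the loop runs at most hi - lo times (the gap at least halves each step), so hi - lo is enough fuel
def solBSearch (pfx : List Int) (k : Int) (lo hi : Nat) : Nat :=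
  solBSearchGo pfx k (hi - lo) lo hi

def solution_alt (k : Int) (tangerine : List Int) : Int :=
  let cnt := tangerine.foldl (fun d t => d.insert t (d.getD t 0 + 1)) PySem.Dict.empty
  let counts := PySem.List.sorted cnt.values (fun x => x) true
  if counts = [] then 0
  else
    let pfx := (counts.foldl (fun st c => (st.1 ++ [st.2 + c], st.2 + c)) (([] : List Int), (0 : Int))).1
    let lo := solBSearch pfx k 0 pfx.length
    ((min lo (pfx.length - 1) : Nat) : Int) + 1

-- ===== PRECONDITION & SPEC =====
def Spec_solution (k : Int) (tangerine : List Int) (out : Int) : Prop := out = solution_alt k tangerine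
instance (k : Int) (tangerine : List Int) (out : Int) : Decidable (Spec_solution k tangerine out) := by unfold Spec_solution; infer_instance

-- ===== CLAIM (what is proved, stated in full; the proofs are below) =====
def Claim_equal_solution : Prop := ∀ (k : Int) (tangerine : List Int), Dom_solution k tangerine → Spec_solution k tangerine (solution k tangerine)

-- ===== LEMMAS AND PROOFS =====

-- first index (capped at length) whose pfx sum is ≥ k
def solIdx (k : Int) : List Int → Nat
  | [] => 0
  | c :: rest => if k ≤ c then 0 else solIdx (k - c) rest + 1

-- pfx sums starting from a running total t
def solPrefix (t : Int) : List Int → List Int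
  | [] => []
  | c :: rest => (t + c) :: solPrefix (t + c) rest

theorem solPrefix_length (t : Int) (cs : List Int) : (solPrefix t cs).length = cs.length := by
  induction cs generalizing t with
  | nil => rfl
  | cons c rest ih => simp [solPrefix, ih]

theorem foldl_prefix_eq (cs : List Int) (pr : List Int) (t : Int) :
    cs.foldl (fun st c => (st.1 ++ [st.2 + c], st.2 + c)) (pr, t)
      = (pr ++ solPrefix t cs, t + cs.sum) := by
  induction cs generalizing pr t with
  | nil => simp [solPrefix]
  | cons c rest ih => simp [solPrefix, ih, List.append_assoc]; ring

theorem solIdx_le_length (k : Int) (cs : List Int) : solIdx k cs ≤ cs.length := by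
  induction cs generalizing k with
  | nil => simp [solIdx]
  | cons c rest ih =>
    simp only [solIdx]
    split
    · simp
    · simpa using Nat.succ_le_succ (ih (k - c))

theorem solPrefix_ge (t : Int) (cs : List Int) (hpos : ∀ c ∈ cs, 1 ≤ c)
    (j : Nat) (hj : j < cs.length) : t + 1 ≤ (solPrefix t cs).getD j 0 := by
  induction cs generalizing t j with
  | nil => simp at hj
  | cons c rest ih =>
    cases j with
    | zero =>
      have := hpos c (by simp)
      simp [solPrefix]; omega
    | succ j' =>
      have h := ih (t + c) (fun x hx => hpos x (by simp [hx])) j' (by simpa using hj)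
      have hc := hpos c (by simp)
      simp only [solPrefix, List.getD_cons_succ]
      omega

theorem solPrefix_lt_of_lt_idx (k t : Int) (cs : List Int)
    (j : Nat) (hj : j < solIdx k cs) : (solPrefix t cs).getD j 0 < k + t := by
  induction cs generalizing k t j with
  | nil => simp [solIdx] at hj
  | cons c rest ih =>
    simp only [solIdx] at hj
    split at hj
    · omega
    · rename_i hkc
      cases j with
      | zero => simp [solPrefix]; omega
      | succ j' =>
        have h := ih (k - c) (t + c) j' (by omega)
        simp only [solPrefix, List.getD_cons_succ]
        omega

theorem solPrefix_ge_of_idx_le (k t : Int) (cs : List Int) (hpos : ∀ c ∈ cs, 1 ≤ c)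
    (j : Nat) (hj1 : solIdx k cs ≤ j) (hj2 : j < cs.length) :
    k + t ≤ (solPrefix t cs).getD j 0 := by
  induction cs generalizing k t j with
  | nil => simp at hj2
  | cons c rest ih =>
    simp only [solIdx] at hj1
    split at hj1
    · rename_i hkc
      -- k ≤ c : every entry is ≥ t + c + something ≥ k + t
      cases j with
      | zero => simp [solPrefix]; omega
      | succ j' =>
        have h := solPrefix_ge (t + c) rest (fun x hx => hpos x (by simp [hx])) j' (by simpa using hj2)
        simp only [solPrefix, List.getD_cons_succ]
        omega
    · rename_i hkc
      cases j with
      | zero => omega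
      | succ j' =>
        have h := ih (k - c) (t + c) (fun x hx => hpos x (by simp [hx])) j' (by omega) (by simpa using hj2)
        simp only [solPrefix, List.getD_cons_succ]
        omega

-- the binary search converges to any N bracketed by the two prefix properties
theorem solBSearchGo_eq (pfx : List Int) (k : Int) (N : Nat)
    (hlt : ∀ j < N, pfx.getD j 0 < k)
    (hge : ∀ j, N ≤ j → j < pfx.length → k ≤ pfx.getD j 0) :
    ∀ fuel lo hi, hi - lo ≤ fuel → lo ≤ N → N ≤ hi → hi ≤ pfx.length →
      solBSearchGo pfx k fuel lo hi = N := by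
  intro fuel
  induction fuel with
  | zero => intro lo hi hf h1 h2 h3; simp [solBSearchGo]; omega
  | succ fuel ih =>
    intro lo hi hf h1 h2 h3
    simp only [solBSearchGo]
    split
    · rename_i hlh
      set mid := (lo + hi) / 2 with hmd
      have hmlt : mid < hi := by omega
      have hmge : lo ≤ mid := by omega
      split
      · rename_i hpm
        have hmN : mid < N := by
          by_contra hc
          have := hge mid (by omega) (by omega)
          omega
        exact ih (mid + 1) hi (by omega) (by omega) h2 h3
      · rename_i hpm
        have hNm : N ≤ mid := by
          by_contra hc
          have := hlt mid (by omega)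
          omega
        exact ih lo mid (by omega) h1 hNm (by omega)
    · omega

theorem solBSearch_eq (pfx : List Int) (k : Int) (N : Nat)
    (hlt : ∀ j < N, pfx.getD j 0 < k)
    (hge : ∀ j, N ≤ j → j < pfx.length → k ≤ pfx.getD j 0) :
    ∀ lo hi, lo ≤ N → N ≤ hi → hi ≤ pfx.length → solBSearch pfx k lo hi = N := by
  intro lo hi h1 h2 h3
  exact solBSearchGo_eq pfx k N hlt hge (hi - lo) lo hi le_rfl h1 h2 h3

-- the greedy loop computes min(first index, len-1) + 1 on a nonempty list
theorem solLoopA_eq (cs : List Int) (k a : Int) (hne : cs ≠ []) :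
    solLoopA k a cs = a + ((min (solIdx k cs) (cs.length - 1) : Nat) : Int) + 1 := by
  induction cs generalizing k a with
  | nil => exact absurd rfl hne
  | cons c rest ih =>
    simp only [solLoopA, solIdx]
    by_cases hkc : k ≤ c
    · simp [hkc, show k - c ≤ 0 by omega]
    · have hk' : ¬ (k - c ≤ 0) := by omega
      simp only [if_neg hk', if_neg hkc]
      cases rest with
      | nil => simp [solLoopA, solIdx]
      | cons d rest' =>
        rw [ih (k - c) (a + 1) (by simp)]
        have hle := solIdx_le_length (k - c) (d :: rest')
        simp only [List.length_cons] at *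
        have : min (solIdx (k - c) (d :: rest') + 1) (rest'.length + 1 + 1 - 1)
             = min (solIdx (k - c) (d :: rest')) (rest'.length + 1 - 1) + 1 := by omega
        rw [this]
        push_cast
        ring

-- every value of the counting dict is ≥ 1
theorem counter_values_pos (xs : List Int) :
    ∀ v ∈ (PySem.Dict.counter xs).values, 1 ≤ v := by
  intro v hv
  simp only [PySem.Dict.values, PySem.Dict.items_counter, List.map_map] at hv
  obtain ⟨x, hx, hxv⟩ := List.mem_map.mp hv
  simp only [Function.comp] at hxv
  have hmem : x ∈ xs := (PySem.Set.mem_ofList _ _).mp hx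
  have : 1 ≤ xs.count x := List.one_le_count_iff.mpr hmem
  subst hxv
  exact_mod_cast this

-- A's index-loop counting dict is Counter(tangerine)
theorem countA_eq (xs : List Int) :
    (PySem.List.pyRange 0 (xs.length : Int) 1).foldl
      (fun d i => d.insert (PySem.List.pyGetD xs i 0) (d.getD (PySem.List.pyGetD xs i 0) 0 + 1))
      PySem.Dict.empty
    = PySem.Dict.counter xs := by
  exact (PySem.List.foldl_pyRange_zero_pyGetD' xs 0
      (fun (d : PySem.Dict Int Int) t => d.insert t (d.getD t 0 + 1)) PySem.Dict.empty).trans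
    (PySem.Dict.foldl_insert_getD_add_one_eq_counter xs)

-- the whole pipeline after counting, for an arbitrary positive count list
theorem main_eq (k : Int) (cs : List Int) (hpos : ∀ c ∈ cs, 1 ≤ c) :
    solLoopA k 0 cs
      = if cs = [] then 0
        else
          ((min (solBSearch (cs.foldl (fun st c => (st.1 ++ [st.2 + c], st.2 + c)) (([] : List Int), (0 : Int))).1 k 0
                  (cs.foldl (fun st c => (st.1 ++ [st.2 + c], st.2 + c)) (([] : List Int), (0 : Int))).1.length)
                ((cs.foldl (fun st c => (st.1 ++ [st.2 + c], st.2 + c)) (([] : List Int), (0 : Int))).1.length - 1) : Nat) : Int) + 1 := by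
  by_cases hnil : cs = []
  · subst hnil; rfl
  · rw [if_neg hnil, foldl_prefix_eq]
    simp only [List.nil_append]
    have hlen : (solPrefix 0 cs).length = cs.length := solPrefix_length 0 cs
    have hbs : solBSearch (solPrefix 0 cs) k 0 (solPrefix 0 cs).length = solIdx k cs := by
      apply solBSearch_eq (solPrefix 0 cs) k (solIdx k cs)
      · intro j hj
        have := solPrefix_lt_of_lt_idx k 0 cs j hj
        omega
      · intro j hj1 hj2
        have := solPrefix_ge_of_idx_le k 0 cs hpos j hj1 (by omega)
        omega
      · exact Nat.zero_le _
      · rw [hlen]; exact solIdx_le_length k cs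
      · exact le_rfl
    rw [hbs, solLoopA_eq cs k 0 hnil, hlen]
    ring

-- ===== VERDICT (by name: the statement is the Claim_ definition above) =====
theorem solution_spec : Claim_equal_solution := by
  intro k tangerine _
  show solution k tangerine = solution_alt k tangerine
  unfold solution solution_alt
  rw [countA_eq]
  rw [show List.foldl (fun (d : PySem.Dict Int Int) t => d.insert t (d.getD t 0 + 1)) PySem.Dict.empty tangerine
        = PySem.Dict.counter tangerine from PySem.Dict.foldl_insert_getD_add_one_eq_counter tangerine]
  exact main_eq k (PySem.List.sorted (PySem.Dict.counter tangerine).values (fun x => x) true)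
    (fun c hc => counter_values_pos tangerine c ((PySem.List.mem_sorted _ _ _ _).mp hc))
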